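-- pv_equiv track=rewrite | github.com/taxijjang/algorithm | 토스/1번.py | solution
-- ===== SOURCE A (Python) =====
-- from collections import defaultdict, Counter
--
-- def solution(name_list):
--     name_count = defaultdict(int)
--     answer = []
--     for name in name_list:
--         new_name = name + chr(65 + name_count[name])
--         answer.append(new_name)
--         name_count[name] += 1
--     return answer
-- ===== SOURCE B (Python) =====
-- from collections import defaultdict
--
-- def solution(name_list):
--     groups = defaultdict(list)
--     for i, name in enumerate(name_list):
--         groups[name].append(i)
--     result = [""] * len(name_list)
--     for name, idxs in groups.items():
--         for k, i in enumerate(idxs):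
--             result[i] = name + chr(65 + k)
--     return result
-- ===== Notes on version B (the rewrite author's own statement) =====
-- stated objective: alternative
-- what changed: replaces A's single stateful pass with a running per-name counter by a two-stage group-by: one pass builds a dict mapping each name to the list of its positions, then a preallocated result array is filled group-wise, writing name+chr(65+k) back at the k-th recorded position of each name
import Mathlib
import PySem

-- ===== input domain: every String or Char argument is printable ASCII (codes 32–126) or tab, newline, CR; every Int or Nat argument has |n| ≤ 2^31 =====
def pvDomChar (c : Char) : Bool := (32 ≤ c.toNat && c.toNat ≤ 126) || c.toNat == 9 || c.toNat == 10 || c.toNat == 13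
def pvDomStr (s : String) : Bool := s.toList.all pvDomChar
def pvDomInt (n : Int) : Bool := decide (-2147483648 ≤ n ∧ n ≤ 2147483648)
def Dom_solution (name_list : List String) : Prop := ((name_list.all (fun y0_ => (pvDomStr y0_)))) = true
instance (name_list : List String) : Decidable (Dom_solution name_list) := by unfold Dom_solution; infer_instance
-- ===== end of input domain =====

-- B replaces A's single running-counter pass by a two-stage group-by: first a dict from each
-- name to the list of its positions, then a preallocated result array filled group-wise
-- (objective: alternative decomposition, same cost).

-- ===== PORT A =====
-- chr(n) ported by hand (no PySem primitive): exact for every code that is a Unicode scalar value;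
-- in both programs the code is 65 plus a nonnegative occurrence count.
def pyChr (n : Int) : String := String.ofList [Char.ofNat n.toNat]

def solution (name_list : List String) : List String :=
  (name_list.foldl
    (fun (st : PySem.Dict String Int × List String) name =>
      let c := st.1.getD name 0
      (st.1.insert name (c + 1), st.2 ++ [name ++ pyChr (65 + c)]))
    (PySem.Dict.empty, [])).2

-- ===== PORT B =====
def solution_alt (name_list : List String) : List String :=
  let groups : PySem.Dict String (List Int) :=
    (PySem.List.enumerate name_list 0).foldl
      (fun d p => d.modify p.2 [] (fun v => v ++ [p.1])) PySem.Dict.empty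
  groups.items.foldl
    (fun res pr =>
      (PySem.List.enumerate pr.2 0).foldl
        (fun r q => PySem.List.pySetD r q.2 (pr.1 ++ pyChr (65 + q.1))) res)
    (List.replicate name_list.length "")

-- ===== PRECONDITION & SPEC =====
def Spec_solution (name_list : List String) (out : List String) : Prop := out = solution_alt name_list
instance (name_list : List String) (out : List String) : Decidable (Spec_solution name_list out) := by unfold Spec_solution; infer_instance

-- ===== CLAIM (what is proved, stated in full; the proofs are below) =====
def Claim_equal_solution : Prop := ∀ (name_list : List String), Dom_solution name_list → Spec_solution name_list (solution name_list)

-- ===== LEMMAS AND PROOFS =====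

-- reference shape for A: the answer for suffix l, given the already-processed prefix pre
def bspec : List String → List String → List String
  | [], _ => []
  | x :: xs, pre => (x ++ pyChr (65 + (pre.count x : Int))) :: bspec xs (pre ++ [x])

lemma a_eq_bspec :
    ∀ (l : List String) (d : PySem.Dict String Int) (acc pre : List String),
    (∀ s, d.getD s 0 = (pre.count s : Int)) →
    (l.foldl
      (fun (st : PySem.Dict String Int × List String) name =>
        let c := st.1.getD name 0
        (st.1.insert name (c + 1), st.2 ++ [name ++ pyChr (65 + c)]))
      (d, acc)).2 = acc ++ bspec l pre := by
  intro l
  induction l with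
  | nil => intro d acc pre h; simp [bspec]
  | cons x xs ih =>
    intro d acc pre h
    rw [List.foldl_cons]
    have hrec := ih (d.insert x (d.getD x 0 + 1)) (acc ++ [x ++ pyChr (65 + d.getD x 0)]) (pre ++ [x]) ?_
    · simp only at hrec ⊢
      rw [hrec, bspec, h x]
      simp
    · intro s
      rw [PySem.Dict.getD_insert]
      by_cases hs : s = x
      · subst hs; rw [if_pos rfl, h s]; simp
      · rw [if_neg hs, h s]
        have hxs : ¬ x = s := fun he => hs he.symm
        simp [List.count_append, hxs]

lemma bspec_length : ∀ (l pre : List String), (bspec l pre).length = l.length := by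
  intro l
  induction l with
  | nil => intro pre; simp [bspec]
  | cons x xs ih => intro pre; simp [bspec, ih]

lemma bspec_getElem? :
    ∀ (l : List String) (pre : List String) (j : Nat) (x : String), l[j]? = some x →
    (bspec l pre)[j]? = some (x ++ pyChr (65 + (((pre ++ l.take j).count x : Nat) : Int))) := by
  intro l
  induction l with
  | nil => intro pre j x h; simp at h
  | cons y ys ih =>
    intro pre j x h
    cases j with
    | zero => simp at h; subst h; simp [bspec]
    | succ j =>
      simp only [List.getElem?_cons_succ] at h
      have := ih (pre ++ [y]) j x h
      simp only [bspec, List.getElem?_cons_succ, List.take_succ_cons]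
      rw [this]
      simp [List.count_append]

-- the (Nat) positions at which s occurs in l, in increasing order
def occN : List String → String → List Nat
  | [], _ => []
  | x :: xs, s => (if x = s then [0] else []) ++ (occN xs s).map (· + 1)

lemma mem_occN : ∀ (l : List String) (s : String) (j : Nat),
    j ∈ occN l s ↔ l[j]? = some s := by
  intro l
  induction l with
  | nil => intro s j; simp [occN]
  | cons x xs ih =>
    intro s j
    cases j with
    | zero =>
      simp only [occN, List.mem_append, List.mem_map, List.getElem?_cons_zero]
      constructor
      · rintro (h | ⟨a, _, ha⟩)
        · split at h <;> simp_all
        · omega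
      · intro h; left; simp at h; simp [h]
    | succ j =>
      simp only [occN, List.mem_append, List.mem_map, List.getElem?_cons_succ]
      rw [← ih s j]
      constructor
      · rintro (h | ⟨a, ha, ha2⟩)
        · split at h <;> simp_all
        · have : a = j := by omega
          subst this; exact ha
      · intro h; right; exact ⟨j, h, rfl⟩

lemma occN_spec : ∀ (l : List String) (s : String) (k j : Nat),
    (occN l s)[k]? = some j →
    j < l.length ∧ l[j]? = some s ∧ (l.take j).count s = k := by
  intro l
  induction l with
  | nil => intro s k j h; simp [occN] at h
  | cons x xs ih =>
    intro s k j h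
    by_cases hx : x = s
    · subst hx
      rw [occN, if_pos rfl, List.singleton_append] at h
      cases k with
      | zero =>
        simp only [List.getElem?_cons_zero, Option.some.injEq] at h
        subst h
        simp
      | succ k =>
        rw [List.getElem?_cons_succ, List.getElem?_map] at h
        cases hj' : (occN xs x)[k]? with
        | none => rw [hj'] at h; simp at h
        | some j' =>
          rw [hj'] at h
          simp only [Option.map_some, Option.some.injEq] at h
          subst h
          obtain ⟨h1, h2, h3⟩ := ih x k j' hj'
          refine ⟨by simpa using h1, by simpa using h2, ?_⟩
          simp [List.take_succ_cons, h3]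
    · rw [occN, if_neg hx, List.nil_append, List.getElem?_map] at h
      cases hj' : (occN xs s)[k]? with
      | none => rw [hj'] at h; simp at h
      | some j' =>
        rw [hj'] at h
        simp only [Option.map_some, Option.some.injEq] at h
        subst h
        obtain ⟨h1, h2, h3⟩ := ih s k j' hj'
        refine ⟨by simpa using h1, by simpa using h2, ?_⟩
        rw [List.take_succ_cons]
        simp only [List.count_cons, h3]
        simp
        exact hx

-- the filtered enumerate underlying the groups dict IS occN (shifted by the start)
lemma filter_enumerate_eq_occN : ∀ (l : List String) (s : String) (a : Int),
    ((PySem.List.enumerate l a).filter (fun p => p.2 == s)).map (fun p => p.1)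
      = (occN l s).map (fun (j : Nat) => a + (j : Int)) := by
  intro l
  induction l with
  | nil => intro s a; simp [PySem.List.enumerate, occN]
  | cons x xs ih =>
    intro s a
    rw [PySem.List.enumerate_cons]
    by_cases hx : x = s
    · subst hx
      rw [List.filter_cons_of_pos (by simp), List.map_cons, ih x (a + 1)]
      have hocc : occN (x :: xs) x = 0 :: (occN xs x).map (· + 1) := by simp [occN]
      rw [hocc, List.map_cons, List.map_map]
      refine List.cons_eq_cons.mpr ⟨by simp, ?_⟩
      apply List.map_congr_left
      intro j _
      simp only [Function.comp_apply]
      push_cast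
      ring
    · rw [List.filter_cons_of_neg (by simp [hx]), ih s (a + 1)]
      have hocc : occN (x :: xs) s = (occN xs s).map (· + 1) := by simp [occN, hx]
      rw [hocc, List.map_map]
      apply List.map_congr_left
      intro j _
      simp only [Function.comp_apply]
      push_cast
      ring

def mkGroups (name_list : List String) : PySem.Dict String (List Int) :=
  (PySem.List.enumerate name_list 0).foldl
    (fun d p => d.modify p.2 [] (fun v => v ++ [p.1])) PySem.Dict.empty

lemma mkGroups_getD (name_list : List String) (s : String) :
    (mkGroups name_list).getD s [] = (occN name_list s).map (fun (j : Nat) => (j : Int)) := by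
  unfold mkGroups
  have h1 : (PySem.List.enumerate name_list 0).foldl
      (fun d p => d.modify p.2 [] (fun v => v ++ [p.1])) PySem.Dict.empty
    = ((PySem.List.enumerate name_list 0).map Prod.swap).foldl
      (fun d p => d.modify p.1 [] (fun v => v ++ [p.2])) PySem.Dict.empty :=
    (List.foldl_map (f := Prod.swap)
      (g := fun (d : PySem.Dict String (List Int)) p => d.modify p.1 [] (fun v => v ++ [p.2]))).symm
  rw [h1, PySem.Dict.getD_foldl_modify_append, List.filter_map, List.map_map]
  have hpred : ((fun (p : String × Int) => p.1 == s) ∘ Prod.swap)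
      = (fun (p : Int × String) => p.2 == s) := rfl
  have hfun : ((fun (x : String × Int) => x.2) ∘ Prod.swap)
      = (fun (p : Int × String) => p.1) := rfl
  rw [hpred, hfun, PySem.Dict.getD_empty, List.nil_append,
    filter_enumerate_eq_occN name_list s 0]
  simp

lemma mkGroups_keys_nodup (name_list : List String) : (mkGroups name_list).keys.Nodup := by
  unfold mkGroups
  exact PySem.Dict.nodup_keys_foldl_modify_key (PySem.List.enumerate name_list 0)
    (fun p => p.2) ([] : List Int) (fun _ p v => v ++ [p.1]) PySem.Dict.empty
    (by simp [PySem.Dict.keys_empty])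

lemma mem_mkGroups_keys (name_list : List String) (s : String) :
    s ∈ (mkGroups name_list).keys ↔ s ∈ name_list := by
  unfold mkGroups
  have hk := PySem.Dict.keys_foldl_modify_key (PySem.List.enumerate name_list 0)
    (fun p => p.2) ([] : List Int) (fun _ p v => v ++ [p.1]) PySem.Dict.empty
  rw [hk, PySem.Dict.keys_empty, PySem.Set.update_nil_left, PySem.Set.mem_ofList,
    PySem.List.map_snd_enumerate]

-- membership in enumerate, by position
lemma mem_enumerate_iff : ∀ {α : Type} (l : List α) (a : Int) (p : Int × α),
    p ∈ PySem.List.enumerate l a ↔ ∃ k : Nat, p.1 = a + (k : Int) ∧ l[k]? = some p.2 := by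
  intro α l
  induction l with
  | nil => intro a p; simp [PySem.List.enumerate]
  | cons x xs ih =>
    intro a p
    rw [PySem.List.enumerate_cons]
    simp only [List.mem_cons, ih (a + 1)]
    constructor
    · rintro (h | ⟨k, hk1, hk2⟩)
      · exact ⟨0, by simp [h], by simp [h]⟩
      · exact ⟨k + 1, by push_cast; omega, by simpa using hk2⟩
    · rintro ⟨k, hk1, hk2⟩
      cases k with
      | zero =>
        left
        simp only [List.getElem?_cons_zero, Option.some.injEq] at hk2
        obtain ⟨p1, p2⟩ := p
        simp at hk1 hk2 ⊢
        exact ⟨hk1, hk2.symm⟩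
      | succ k =>
        right
        exact ⟨k, by push_cast at hk1 ⊢; omega, by simpa using hk2⟩

-- fold of index-writes: length, untouched positions, written positions
lemma foldl_pySetD_length : ∀ (W : List (Int × String)) (r : List String),
    (W.foldl (fun r w => PySem.List.pySetD r w.1 w.2) r).length = r.length := by
  intro W
  induction W with
  | nil => intro r; rfl
  | cons w ws ih => intro r; rw [List.foldl_cons, ih, PySem.List.length_pySetD]

lemma foldl_pySetD_untouched : ∀ (W : List (Int × String)) (r : List String) (j : Nat),
    (∀ w ∈ W, 0 ≤ w.1) → ((j : Int) ∉ W.map (fun w => w.1)) →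
    (W.foldl (fun r w => PySem.List.pySetD r w.1 w.2) r)[j]? = r[j]? := by
  intro W
  induction W with
  | nil => intro r j _ _; rfl
  | cons w ws ih =>
    intro r j hpos hj
    simp only [List.map_cons, List.mem_cons, not_or] at hj
    rw [List.foldl_cons, ih _ _ (fun w hw => hpos w (List.mem_cons_of_mem _ hw)) hj.2]
    rw [PySem.List.pySetD_of_nonneg _ _ (hpos w (List.mem_cons_self))]
    apply List.getElem?_set_ne
    have h0 := hpos w List.mem_cons_self
    intro he
    apply hj.1
    omega

lemma foldl_pySetD_written : ∀ (W : List (Int × String)) (r : List String) (j : Nat) (tv : String),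
    j < r.length →
    (∀ w ∈ W, 0 ≤ w.1) → (∀ w ∈ W, w.1 = (j : Int) → w.2 = tv) →
    ((j : Int) ∈ W.map (fun w => w.1)) →
    (W.foldl (fun r w => PySem.List.pySetD r w.1 w.2) r)[j]? = some tv := by
  intro W
  induction W with
  | nil => intro r j tv _ _ _ h; simp at h
  | cons w ws ih =>
    intro r j tv hlen hpos hval hj
    rw [List.foldl_cons]
    by_cases hmem : (j : Int) ∈ ws.map (fun w => w.1)
    · exact ih _ _ _ (by rw [PySem.List.length_pySetD]; exact hlen)
        (fun w hw => hpos w (List.mem_cons_of_mem _ hw))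
        (fun w hw => hval w (List.mem_cons_of_mem _ hw)) hmem
    · simp only [List.map_cons, List.mem_cons] at hj
      have hw1 : w.1 = (j : Int) := (hj.resolve_right hmem).symm
      rw [foldl_pySetD_untouched ws _ j (fun w hw => hpos w (List.mem_cons_of_mem _ hw)) hmem]
      rw [PySem.List.pySetD_of_nonneg _ _ (hpos w List.mem_cons_self), hw1]
      simp only [Int.toNat_natCast]
      rw [List.getElem?_set_self hlen, hval w List.mem_cons_self hw1]

-- nesting the two write loops into one fold over the flattened write list
lemma foldl_foldl_eq_flatMap {α β γ : Type} (f : γ → β → γ) (wl : α → List β) :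
    ∀ (L : List α) (r : γ),
    L.foldl (fun r x => (wl x).foldl f r) r = (L.flatMap wl).foldl f r := by
  intro L
  induction L with
  | nil => intro r; rfl
  | cons x xs ih => intro r; rw [List.foldl_cons, List.flatMap_cons, List.foldl_append, ih]

-- the value every write at position j carries
def targetVal (name_list : List String) (j : Nat) (x : String) : String :=
  x ++ pyChr (65 + (((name_list.take j).count x : Nat) : Int))

-- the flattened write list of B
def writesOf (name_list : List String) : List (Int × String) :=
  (mkGroups name_list).items.flatMap
    (fun pr => (PySem.List.enumerate pr.2 0).map
      (fun q => (q.2, pr.1 ++ pyChr (65 + q.1))))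

lemma mem_writesOf (name_list : List String) (w : Int × String) (hw : w ∈ writesOf name_list) :
    ∃ (s : String) (k j : Nat), (occN name_list s)[k]? = some j ∧ w.1 = (j : Int) ∧
      w.2 = s ++ pyChr (65 + (k : Int)) := by
  unfold writesOf at hw
  rw [List.mem_flatMap] at hw
  obtain ⟨pr, hpr, hw⟩ := hw
  rw [PySem.Dict.items_eq_map_keys _ (mkGroups_keys_nodup name_list) []] at hpr
  rw [List.mem_map] at hpr
  obtain ⟨s, _, hseq⟩ := hpr
  subst hseq
  rw [List.mem_map] at hw
  obtain ⟨q, hq, hweq⟩ := hw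
  simp only [mkGroups_getD] at hq
  rw [mem_enumerate_iff] at hq
  obtain ⟨k, hk1, hk2⟩ := hq
  rw [List.getElem?_map] at hk2
  cases hj : (occN name_list s)[k]? with
  | none => rw [hj] at hk2; simp at hk2
  | some j =>
    rw [hj] at hk2
    simp only [Option.map_some, Option.some.injEq] at hk2
    refine ⟨s, k, j, hj, ?_, ?_⟩
    · rw [← hweq]; exact hk2.symm
    · rw [← hweq]; simp only; rw [hk1]; simp

lemma writesOf_nonneg (name_list : List String) :
    ∀ w ∈ writesOf name_list, 0 ≤ w.1 := by
  intro w hw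
  obtain ⟨s, k, j, _, h1, _⟩ := mem_writesOf name_list w hw
  rw [h1]; positivity

lemma writesOf_val (name_list : List String) (j : Nat) (x : String)
    (hx : name_list[j]? = some x) :
    ∀ w ∈ writesOf name_list, w.1 = (j : Int) → w.2 = targetVal name_list j x := by
  intro w hw h1
  obtain ⟨s, k, j', hj', hw1, hw2⟩ := mem_writesOf name_list w hw
  rw [hw1] at h1
  have hjk : j' = j := by exact_mod_cast h1
  subst hjk
  obtain ⟨_, hs, hcnt⟩ := occN_spec name_list s k j' hj'
  rw [hx] at hs
  have hsx : s = x := by simpa using hs.symm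
  subst hsx
  rw [hw2, targetVal, hcnt]

lemma writesOf_cover (name_list : List String) (j : Nat) (x : String)
    (hx : name_list[j]? = some x) :
    (j : Int) ∈ (writesOf name_list).map (fun w => w.1) := by
  have hjmem : j ∈ occN name_list x := (mem_occN name_list x j).mpr hx
  obtain ⟨k, hk⟩ := List.getElem?_of_mem hjmem
  rw [List.mem_map]
  refine ⟨((j : Int), x ++ pyChr (65 + (k : Int))), ?_, rfl⟩
  unfold writesOf
  rw [List.mem_flatMap]
  refine ⟨(x, (mkGroups name_list).getD x []), ?_, ?_⟩
  · rw [PySem.Dict.items_eq_map_keys _ (mkGroups_keys_nodup name_list) [], List.mem_map]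
    refine ⟨x, ?_, rfl⟩
    rw [mem_mkGroups_keys]
    exact List.mem_of_getElem? hx
  · rw [List.mem_map]
    refine ⟨((k : Int), (j : Int)), ?_, rfl⟩
    simp only [mkGroups_getD]
    rw [mem_enumerate_iff]
    exact ⟨k, by simp, by rw [List.getElem?_map, hk]; rfl⟩

lemma alt_eq_writes (name_list : List String) :
    solution_alt name_list
      = (writesOf name_list).foldl (fun r w => PySem.List.pySetD r w.1 w.2)
          (List.replicate name_list.length "") := by
  unfold solution_alt writesOf mkGroups
  simp only
  rw [← foldl_foldl_eq_flatMap]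
  congr 1
  funext r pr
  rw [List.foldl_map]

-- ===== VERDICT (by name: the statement is the Claim_ definition above) =====
theorem solution_spec : Claim_equal_solution := by
  intro name_list _
  unfold Spec_solution
  have hA : solution name_list = bspec name_list [] := by
    unfold solution
    rw [a_eq_bspec name_list PySem.Dict.empty [] [] (by simp [PySem.Dict.getD_empty])]
    simp
  rw [hA, alt_eq_writes]
  apply List.ext_getElem?
  intro j
  by_cases hj : j < name_list.length
  · obtain ⟨x, hx⟩ : ∃ x, name_list[j]? = some x :=
      ⟨name_list[j], List.getElem?_eq_getElem hj⟩
    rw [bspec_getElem? name_list [] j x hx]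
    rw [foldl_pySetD_written _ _ j (targetVal name_list j x)
      (by rw [List.length_replicate]; exact hj)
      (writesOf_nonneg name_list) (writesOf_val name_list j x hx)
      (writesOf_cover name_list j x hx)]
    unfold targetVal
    simp
  · rw [List.getElem?_eq_none (by rw [bspec_length]; omega),
      List.getElem?_eq_none
        (by rw [foldl_pySetD_length, List.length_replicate]; omega)]
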